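-- pv_equiv track=rewrite | github.com/motsuni04/hanmaru-rewrite | src/utils.py | unitize
-- ===== SOURCE A (Python) =====
-- def unitize(n: int) -> str:
--     if n < 10000:
--         return str(n)
--
--     units = ['', '만', '억', '조', '경', '해', '자', '양', '구', '간', '정']
--     result = []
--     i = 0
--     while n > 0:
--         if n % 10000 > 0:
--             result.append(f"{n % 10000}{units[i]}")
--         n //= 10000
--         i += 1
--     return ' '.join(reversed(result))
-- ===== SOURCE B (Python) =====
-- def unitize(n: int) -> str:
--     if n < 10000:
--         return str(n)
--
--     units = ['', '만', '억', '조', '경', '해', '자', '양', '구', '간', '정']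
--     # pre-pass: highest base-10000 chunk index
--     hi = 0
--     p = 1
--     while p * 10000 <= n:
--         p *= 10000
--         hi += 1
--     parts = []
--     for i in range(hi, -1, -1):
--         chunk = (n // 10000 ** i) % 10000
--         if chunk > 0:
--             parts.append(f"{chunk}{units[i]}")
--     return ' '.join(parts)
-- ===== Notes on version B (the rewrite author's own statement) =====
-- stated objective: alternative
-- what changed: B first computes the highest base-10000 chunk index by a magnitude pre-pass, then extracts chunks most-significant-first by division with 10000**i, so the parts list is built in final order and no reversal is needed; A repeatedly divides n bottom-up and reverses at the end.
import Mathlib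
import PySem

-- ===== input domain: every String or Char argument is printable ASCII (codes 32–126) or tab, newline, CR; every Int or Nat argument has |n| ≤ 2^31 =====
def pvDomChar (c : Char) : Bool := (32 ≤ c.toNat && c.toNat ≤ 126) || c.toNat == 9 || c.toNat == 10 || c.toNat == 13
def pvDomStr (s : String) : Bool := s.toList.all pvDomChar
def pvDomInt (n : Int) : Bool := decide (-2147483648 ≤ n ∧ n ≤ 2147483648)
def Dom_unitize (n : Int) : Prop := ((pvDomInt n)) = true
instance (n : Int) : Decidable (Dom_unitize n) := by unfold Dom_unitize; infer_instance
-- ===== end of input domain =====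

-- B extracts base-10000 chunks most-significant-first after a magnitude pre-pass (no reversal);
-- A builds them least-significant-first and reverses. Same return value on the domain (alternative decomposition).


-- ===== PORT A =====
def unitsK : List String := ["", "만", "억", "조", "경", "해", "자", "양", "구", "간", "정"]

-- the while-loop of A; units[i] is in range for every n with |n| ≤ 2^31 (i ≤ 2), so getD is exact on Dom
def unitizeLoop (n : Int) (i : Nat) (result : List String) : List String :=
  if _h : n > 0 then
    unitizeLoop (PySem.Int.floordiv n 10000) (i + 1)
      (if PySem.Int.mod n 10000 > 0
       then result ++ [PySem.Int.toStr (PySem.Int.mod n 10000) ++ unitsK.getD i ""]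
       else result)
  else result
termination_by n.toNat
decreasing_by
  rw [PySem.Int.floordiv_eq_ediv_of_pos (by norm_num)]
  omega

def unitize (n : Int) : String :=
  if n < 10000 then PySem.Int.toStr n
  else PySem.Str.join " " (unitizeLoop n 0 []).reverse

-- ===== PORT B =====
-- magnitude pre-pass: while p * 10000 <= n: p *= 10000; hi += 1  (hp records the invariant 0 < p for termination)
def hiLoop (n p : Int) (hi : Int) (hp : 0 < p) : Int :=
  if _h : p * 10000 ≤ n then hiLoop n (p * 10000) (hi + 1) (by positivity) else hi
termination_by (n - p).toNat
decreasing_by omega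

def unitize_alt (n : Int) : String :=
  if n < 10000 then PySem.Int.toStr n
  else
    let hi := hiLoop n 1 0 (by norm_num)
    let parts := (PySem.List.pyRange hi (-1) (-1)).foldl
      (fun parts i =>
        -- i ranges over hi..0, so i ≥ 0 and i ≤ 2 on Dom: toNat/getD are exact here
        let chunk := PySem.Int.mod (PySem.Int.floordiv n (10000 ^ i.toNat)) 10000
        if chunk > 0 then parts ++ [PySem.Int.toStr chunk ++ unitsK.getD i.toNat ""] else parts)
      []
    PySem.Str.join " " parts

-- ===== PRECONDITION & SPEC =====
def Spec_unitize (n : Int) (out : String) : Prop := out = unitize_alt n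
instance (n : Int) (out : String) : Decidable (Spec_unitize n out) := by unfold Spec_unitize; infer_instance

-- ===== CLAIM (what is proved, stated in full; the proofs are below) =====
def Claim_equal_unitize : Prop := ∀ (n : Int), Dom_unitize n → Spec_unitize n (unitize n)

-- ===== LEMMAS AND PROOFS =====

theorem unitizeLoop_eval (n : Int) (i : Nat) (r : List String) :
    unitizeLoop n i r =
      if n > 0 then
        unitizeLoop (PySem.Int.floordiv n 10000) (i + 1)
          (if PySem.Int.mod n 10000 > 0
           then r ++ [PySem.Int.toStr (PySem.Int.mod n 10000) ++ unitsK.getD i ""]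
           else r)
      else r := by
  rw [unitizeLoop]; split <;> rfl

theorem hiLoop_eval (n p hi : Int) (hp : 0 < p) :
    hiLoop n p hi hp =
      if h : p * 10000 ≤ n then hiLoop n (p * 10000) (hi + 1) (by positivity) else hi := by
  rw [hiLoop]

-- ===== VERDICT (by name: the statement is the Claim_ definition above) =====
theorem unitize_spec : Claim_equal_unitize := by
  intro n hdom
  unfold Spec_unitize unitize unitize_alt
  by_cases hlt : n < 10000
  · simp [hlt]
  · simp only [hlt, if_false]
    have hn : 10000 ≤ n := by omega
    have hub : n ≤ 2147483648 := by
      simp [Dom_unitize, pvDomInt] at hdom; omega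
    -- common abbreviations
    have h4 : (0:Int) < 10000 := by norm_num
    have fd1 : PySem.Int.floordiv n 10000 = n / 10000 :=
      PySem.Int.floordiv_eq_ediv_of_pos h4
    have md1 : PySem.Int.mod n 10000 = n % 10000 :=
      PySem.Int.mod_eq_emod_of_pos h4
    set n1 : Int := n / 10000 with hn1
    have fd2 : PySem.Int.floordiv n1 10000 = n1 / 10000 :=
      PySem.Int.floordiv_eq_ediv_of_pos h4
    have md2 : PySem.Int.mod n1 10000 = n1 % 10000 :=
      PySem.Int.mod_eq_emod_of_pos h4
    have hn1pos : 0 < n1 := by omega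
    have hn1ub : n1 ≤ 214748 := by omega
    set n2 : Int := n1 / 10000 with hn2
    have fd3 : PySem.Int.floordiv n2 10000 = n2 / 10000 :=
      PySem.Int.floordiv_eq_ediv_of_pos h4
    have md3 : PySem.Int.mod n2 10000 = n2 % 10000 :=
      PySem.Int.mod_eq_emod_of_pos h4
    have hn2ub : n2 ≤ 21 := by omega
    have hn2nn : 0 ≤ n2 := by omega
    -- B-side chunk divisors
    have fdB0 : PySem.Int.floordiv n (10000 ^ (0:Int).toNat) = n := by
      norm_num [PySem.Int.floordiv_eq_ediv_of_pos (show (0:Int) < 1 by norm_num)]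
    have fdB1 : PySem.Int.floordiv n (10000 ^ (1:Int).toNat) = n1 := by
      simpa using fd1
    have fdB2 : PySem.Int.floordiv n (10000 ^ (2:Int).toNat) = n2 := by
      have h2 : (2:Int).toNat = 2 := rfl
      have : (10000:Int) ^ (2:Int).toNat = 100000000 := by rw [h2]; norm_num
      rw [this, PySem.Int.floordiv_eq_ediv_of_pos (by norm_num)]
      omega
    by_cases h8 : 100000000 ≤ n
    · -- hi = 2, three A-iterations
      have hn2pos : 0 < n2 := by omega
      have hi2 : hiLoop n 1 0 (by norm_num) = 2 := by
        rw [hiLoop_eval]; split_ifs with h1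
        · rw [hiLoop_eval]; split_ifs with h2
          · rw [hiLoop_eval]; split_ifs with h3
            · omega
            · norm_num
          · omega
        · omega
      rw [hi2]
      have hr : PySem.List.pyRange 2 (-1) (-1) = [2, 1, 0] := by decide
      rw [hr]
      -- A side: unfold three iterations
      rw [unitizeLoop_eval]
      simp only [if_pos (by omega : n > 0), md1, fd1]
      rw [unitizeLoop_eval]
      simp only [if_pos (by omega : n1 > 0), md2, fd2]
      rw [unitizeLoop_eval]
      simp only [if_pos (by omega : n2 > 0), md3, fd3]
      rw [unitizeLoop_eval]
      have hz : ¬ (n2 / 10000 > 0) := by omega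
      simp only [if_neg hz]
      have hc2 : n2 % 10000 = n2 := by omega
      -- B side: evaluate the fold
      simp only [List.foldl_cons, List.foldl_nil, fdB0, fdB1, fdB2, md1, md2, md3]
      simp only [hc2, if_pos hn2pos]
      by_cases hc1 : n1 % 10000 > 0 <;> by_cases hc0 : n % 10000 > 0 <;>
        simp [hc1, hc0, unitsK]
    · -- hi = 1, two A-iterations; n1 < 10000 so second chunk = n1 > 0
      have hn1lt : n1 < 10000 := by omega
      have hc1 : n1 % 10000 = n1 := by omega
      have hn2z : n2 = 0 := by omega
      have hi1 : hiLoop n 1 0 (by norm_num) = 1 := by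
        rw [hiLoop_eval]; split_ifs with h1
        · rw [hiLoop_eval]; split_ifs with h2
          · omega
          · norm_num
        · omega
      rw [hi1]
      have hr : PySem.List.pyRange 1 (-1) (-1) = [1, 0] := by decide
      rw [hr]
      rw [unitizeLoop_eval]
      simp only [if_pos (by omega : n > 0), md1, fd1]
      rw [unitizeLoop_eval]
      simp only [if_pos (by omega : n1 > 0), md2, fd2]
      rw [unitizeLoop_eval]
      have hz : ¬ (n2 > 0) := by omega
      simp only [if_neg hz]
      simp only [List.foldl_cons, List.foldl_nil, fdB0, fdB1, md1, md2]
      simp only [hc1, if_pos hn1pos]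
      by_cases hc0 : n % 10000 > 0 <;> simp [hc0, unitsK]
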